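-- pv_equiv track=rewrite | github.com/zeefromzee/QUANTUM-SIMULATOR_KEY-GENERATION | Research Paper/Codes/crpto1.py | xor_fold
-- ===== SOURCE A (Python) =====
-- def xor_fold(data_hex, target_length=64):
--     """
--     XOR-fold hex string to improve bit distribution.
--     Helps with Approximate Entropy test.
--     """
--     data_bytes = bytes.fromhex(data_hex)
--
--     # XOR fold: split in half and XOR together
--     mid = len(data_bytes) // 2
--     first_half = data_bytes[:mid]
--     second_half = data_bytes[mid:mid + len(first_half)]
--
--     xored = bytes(a ^ b for a, b in zip(first_half, second_half))
--
--     # Mix with remaining bytes if odd length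
--     if len(data_bytes) % 2:
--         xored += data_bytes[-1:]
--
--     return xored.hex()
-- ===== SOURCE B (Python) =====
-- def xor_fold(data_hex, target_length=64):
--     """XOR-fold via one big-integer XOR instead of a per-byte Python loop."""
--     data = bytes.fromhex(data_hex)
--     mid = len(data) // 2
--     folded = (int.from_bytes(data[:mid], 'big')
--               ^ int.from_bytes(data[mid:2 * mid], 'big')).to_bytes(mid, 'big')
--     if len(data) % 2:
--         folded += data[-1:]
--     return folded.hex()
-- ===== Notes on version B (the rewrite author's own statement) =====
-- stated objective: faster
-- what changed: Replaces the per-byte Python generator that zips and XORs the two halves with a single big-integer XOR (int.from_bytes / ^ / to_bytes), so the fold is done by three C-level bulk operations instead of an interpreted per-byte loop.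
import Mathlib
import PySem

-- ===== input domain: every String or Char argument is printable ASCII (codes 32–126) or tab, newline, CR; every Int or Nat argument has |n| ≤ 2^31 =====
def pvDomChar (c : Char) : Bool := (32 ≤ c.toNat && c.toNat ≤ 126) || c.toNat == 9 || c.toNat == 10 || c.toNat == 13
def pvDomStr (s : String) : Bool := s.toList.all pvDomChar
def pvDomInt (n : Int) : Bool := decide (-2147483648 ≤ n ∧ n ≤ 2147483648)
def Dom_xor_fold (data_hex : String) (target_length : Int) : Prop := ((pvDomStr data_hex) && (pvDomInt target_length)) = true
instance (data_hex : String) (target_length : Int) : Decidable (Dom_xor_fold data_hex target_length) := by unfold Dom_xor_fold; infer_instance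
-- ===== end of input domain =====

-- B replaces A's per-byte zip/XOR loop by one big-integer XOR of the two halves
-- (int.from_bytes / ^ / to_bytes); equivalence is about the return value only.

-- ===== PORT A =====

-- hex digit value of a character, none if not a hex digit (shared by both ports)
def hexVal? (c : Char) : Option Nat :=
  if 48 ≤ c.toNat ∧ c.toNat ≤ 57 then some (c.toNat - 48)
  else if 97 ≤ c.toNat ∧ c.toNat ≤ 102 then some (c.toNat - 87)
  else if 65 ≤ c.toNat ∧ c.toNat ≤ 70 then some (c.toNat - 55)
  else none

-- the six ASCII whitespace characters bytes.fromhex skips (Python 3.11)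
def isPyWs (c : Char) : Bool :=
  c.toNat == 32 || c.toNat == 9 || c.toNat == 10 || c.toNat == 11 || c.toNat == 12 || c.toNat == 13

-- exact port of bytes.fromhex (Python 3.11): ASCII whitespace allowed between byte
-- pairs but not inside a pair; none = ValueError (shared by both ports)
def fromhexAux : List Char → Option (List Nat)
  | [] => some []
  | c :: rest =>
    if isPyWs c then fromhexAux rest
    else
      match hexVal? c with
      | none => none
      | some h =>
        match rest with
        | [] => none
        | d :: rest' =>
          match hexVal? d with
          | none => none
          | some l => (fromhexAux rest').map (fun bs => (h * 16 + l) :: bs)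

-- lowercase hex digit character (exact for n < 16)
def hexChar (n : Nat) : Char := Char.ofNat (if n < 10 then 48 + n else 87 + n)

-- one byte of bytes.hex(): two lowercase hex characters (shared by both ports)
def byteHex (b : Nat) : List Char := [hexChar (b / 16), hexChar (b % 16)]

def xor_fold (data_hex : String) (target_length : Int) : String :=
  match fromhexAux data_hex.toList with
  | none => ""   -- bytes.fromhex raises ValueError here; excluded by Pre_xor_fold
  | some data_bytes =>
    let mid : Nat := data_bytes.length / 2
    let first_half := PySem.List.slice data_bytes none (some (mid : Int))
    let second_half :=
      PySem.List.slice data_bytes (some (mid : Int)) (some ((mid : Int) + (first_half.length : Int)))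
    let xored := (first_half.zip second_half).map (fun ab => ab.1 ^^^ ab.2)
    let xored :=
      if data_bytes.length % 2 ≠ 0 then xored ++ PySem.List.slice data_bytes (some (-1)) none
      else xored
    String.ofList (xored.flatMap byteHex)

-- ===== PORT B =====

-- int.from_bytes(bs, 'big')
def fromBytesBE (bs : List Nat) : Nat := bs.foldl (fun acc b => acc * 256 + b) 0

-- x.to_bytes(n, 'big') (exact for x < 256^n, which always holds where B calls it)
def toBytesBE : Nat → Nat → List Nat
  | 0, _ => []
  | n + 1, x => toBytesBE n (x / 256) ++ [x % 256]

def xor_fold_alt (data_hex : String) (target_length : Int) : String :=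
  match fromhexAux data_hex.toList with
  | none => ""   -- bytes.fromhex raises ValueError here; excluded by Pre_xor_fold
  | some data =>
    let mid : Nat := data.length / 2
    let folded :=
      toBytesBE mid
        (fromBytesBE (PySem.List.slice data none (some (mid : Int))) ^^^
         fromBytesBE (PySem.List.slice data (some (mid : Int)) (some (2 * (mid : Int)))))
    let folded :=
      if data.length % 2 ≠ 0 then folded ++ PySem.List.slice data (some (-1)) none
      else folded
    String.ofList (folded.flatMap byteHex)

-- ===== PRECONDITION & SPEC =====

-- a hex digit, as str.split()-separated tokens see it
def pvHexDigit (c : Char) : Bool :=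
  ('0' ≤ c && c ≤ '9') || ('a' ≤ c && c ≤ 'f') || ('A' ≤ c && c ≤ 'F')

-- exactly the strings bytes.fromhex accepts: every whitespace-separated run of the
-- string consists of hex digits and has even length (otherwise A raises ValueError)
def Pre_xor_fold (data_hex : String) (target_length : Int) : Prop :=
  ∀ t ∈ PySem.Str.split₀ data_hex, t.toList.length % 2 = 0 ∧ t.toList.all pvHexDigit = true
instance (data_hex : String) (target_length : Int) : Decidable (Pre_xor_fold data_hex target_length) := by
  unfold Pre_xor_fold; infer_instance

def pvWitness_xor_fold : String × Int := ("ab cd", 64)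

def Spec_xor_fold (data_hex : String) (target_length : Int) (out : String) : Prop :=
  out = xor_fold_alt data_hex target_length
instance (data_hex : String) (target_length : Int) (out : String) : Decidable (Spec_xor_fold data_hex target_length out) := by
  unfold Spec_xor_fold; infer_instance

-- ===== CLAIM (what is proved, stated in full; the proofs are below) =====
def Claim_equal_xor_fold : Prop := ∀ (data_hex : String) (target_length : Int), Dom_xor_fold data_hex target_length → Pre_xor_fold data_hex target_length → Spec_xor_fold data_hex target_length (xor_fold data_hex target_length)

-- ===== LEMMAS AND PROOFS =====

theorem hexVal?_lt (c : Char) (n : Nat) (h : hexVal? c = some n) : n < 16 := by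
  unfold hexVal? at h
  split_ifs at h <;> simp_all <;> omega

theorem fromhexAux_lt (cs : List Char) (bs : List Nat) (h : fromhexAux cs = some bs) :
    ∀ b ∈ bs, b < 256 := by
  fun_induction fromhexAux cs generalizing bs with
  | case1 => simp_all
  | case2 => simp_all
  | case3 => simp_all
  | case4 => simp_all
  | case5 => simp_all
  | case6 c hws hnat hvC d rest2 lnat hvD IH =>
    rw [Option.map_eq_some_iff] at h
    obtain ⟨bs0, hbs0, rfl⟩ := h
    intro b hb
    rcases List.mem_cons.mp hb with rfl | hb
    · have := hexVal?_lt _ _ hvC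
      have := hexVal?_lt _ _ hvD
      omega
    · exact IH bs0 hbs0 b hb

theorem pvXorByte (u v a b : Nat) (ha : a < 256) (hb : b < 256) :
    (u * 256 + a) ^^^ (v * 256 + b) = (u ^^^ v) * 256 + (a ^^^ b) := by
  have h256 : (256 : Nat) = 2 ^ 8 := by norm_num
  have hx : a ^^^ b < 2 ^ 8 := Nat.xor_lt_two_pow (by omega) (by omega)
  apply Nat.eq_of_testBit_eq
  intro i
  rw [Nat.mul_comm u, Nat.mul_comm v, Nat.mul_comm (u ^^^ v), h256,
    Nat.testBit_xor, Nat.testBit_two_pow_mul_add u (by omega),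
    Nat.testBit_two_pow_mul_add v (by omega),
    Nat.testBit_two_pow_mul_add (u ^^^ v) hx]
  by_cases h : i < 8 <;> simp [h, Nat.testBit_xor]

theorem fromBytesBE_append (xs : List Nat) (a : Nat) :
    fromBytesBE (xs ++ [a]) = fromBytesBE xs * 256 + a := by
  simp [fromBytesBE]

theorem pvCore (xs ys : List Nat) (hlen : ys.length = xs.length)
    (hx : ∀ b ∈ xs, b < 256) (hy : ∀ b ∈ ys, b < 256) :
    toBytesBE xs.length (fromBytesBE xs ^^^ fromBytesBE ys) =
      (xs.zip ys).map (fun ab => ab.1 ^^^ ab.2) := by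
  induction xs using List.reverseRecOn generalizing ys with
  | nil =>
    have h0 : ys = [] := List.length_eq_zero_iff.mp (by simpa using hlen)
    subst h0; rfl
  | append_singleton l a IH =>
    have hys : ys ≠ [] := by
      intro hcon; rw [hcon] at hlen; simp at hlen
    obtain ⟨m, b, rfl⟩ : ∃ m b, ys = m ++ [b] := ⟨ys.dropLast, ys.getLast hys, (List.dropLast_append_getLast hys).symm⟩
    have hmlen : m.length = l.length := by simpa using hlen
    have ha : a < 256 := hx a (by simp)
    have hb : b < 256 := hy b (by simp)
    have hab : a ^^^ b < 256 := Nat.xor_lt_two_pow (x := a) (y := b) (n := 8) (by omega) (by omega)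
    rw [fromBytesBE_append, fromBytesBE_append, pvXorByte _ _ _ _ ha hb]
    have hZdiv : ((fromBytesBE l ^^^ fromBytesBE m) * 256 + (a ^^^ b)) / 256 = fromBytesBE l ^^^ fromBytesBE m := by omega
    have hZmod : ((fromBytesBE l ^^^ fromBytesBE m) * 256 + (a ^^^ b)) % 256 = a ^^^ b := by omega
    rw [List.length_append, List.length_singleton]
    show toBytesBE l.length _ ++ [_] = _
    rw [hZdiv, hZmod, List.zip_append (by omega)]
    rw [IH m hmlen (fun x hx' => hx x (by simp [hx'])) (fun x hy' => hy x (by simp [hy']))]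
    simp

-- ===== VERDICT (by name: the statement is the Claim_ definition above) =====
theorem xor_fold_spec : Claim_equal_xor_fold := by
  intro data_hex target_length _ _
  unfold Spec_xor_fold xor_fold xor_fold_alt
  cases hparse : fromhexAux data_hex.toList with
  | none => rfl
  | some bs =>
    have hlt := fromhexAux_lt _ _ hparse
    simp only []
    have hfirst : PySem.List.slice bs none (some ((bs.length / 2 : Nat) : Int)) = bs.take (bs.length / 2) :=
      PySem.List.slice_to_natCast bs (bs.length / 2)
    have hlenfirst : (bs.take (bs.length / 2)).length = bs.length / 2 := by
      simp [List.length_take]; omega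
    have hsecondA : PySem.List.slice bs (some ((bs.length / 2 : Nat) : Int))
        (some (((bs.length / 2 : Nat) : Int) + ((bs.take (bs.length / 2)).length : Int))) =
        (bs.drop (bs.length / 2)).take (bs.length / 2) := by
      rw [hlenfirst]
      exact PySem.List.slice_natCast_add bs (bs.length / 2) (bs.length / 2)
    have hsecondB : PySem.List.slice bs (some ((bs.length / 2 : Nat) : Int))
        (some (2 * ((bs.length / 2 : Nat) : Int))) =
        (bs.drop (bs.length / 2)).take (bs.length / 2) := by
      rw [two_mul]
      exact PySem.List.slice_natCast_add bs (bs.length / 2) (bs.length / 2)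
    rw [hfirst, hsecondA, hsecondB]
    have hyslen : ((bs.drop (bs.length / 2)).take (bs.length / 2)).length = bs.length / 2 := by
      simp [List.length_take, List.length_drop]; omega
    have hcore := pvCore (bs.take (bs.length / 2)) ((bs.drop (bs.length / 2)).take (bs.length / 2))
      (by rw [hyslen, hlenfirst])
      (fun x hx' => hlt x (List.mem_of_mem_take hx'))
      (fun x hx' => hlt x (List.mem_of_mem_drop (List.mem_of_mem_take hx')))
    rw [hlenfirst] at hcore
    rw [hcore]
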